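-- pv_equiv track=rewrite | github.com/ikigai-kevin-k/studio-sdp-mirror | dealing_order_check.py | check_dealing_order
-- ===== SOURCE A (Python) =====
-- from typing import List
--
-- def check_dealing_order(card_faces: List[str], outs: bool = False) -> bool:
--     """
--     Check if the dealing order is correct based on card faces (empty string means not dealt).
--     Args:
--         card_faces (List[str]): List of card faces in the order they were dealt. Each element is a string (e.g., 'AC', '2D', '')
--         outs (bool): If True, consider outs (third card) cases. If False, only check for the first four cards.
--     Returns:
--         bool: True if the dealing order is correct (no skipped positions before a card is dealt), False otherwise.
--     """
--     # Define the expected number of cards for non-outs and outs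
--     expected_len = 6 if outs else 4
--     if len(card_faces) < expected_len:
--         return False
--     # Only check up to expected_len
--     faces = card_faces[:expected_len]
--     found_empty = False
--     for face in faces:
--         if face == "":
--             found_empty = True
--         elif found_empty:
--             # If a card appears after an empty slot, order is wrong
--             return False
--     return True
-- ===== SOURCE B (Python) =====
-- from typing import List
--
-- def check_dealing_order(card_faces: List[str], outs: bool = False) -> bool:
--     expected_len = 6 if outs else 4
--     if len(card_faces) < expected_len:
--         return False
--     faces = card_faces[:expected_len]
--     non_empty = [f for f in faces if f != ""]
--     return faces[:len(non_empty)] == non_empty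
-- ===== Notes on version B (the rewrite author's own statement) =====
-- stated objective: simpler
-- what changed: Replaces the stateful found_empty flag scan with early return by filtering out empty slots and checking that the non-empty faces form the leading prefix of the checked window.
import Mathlib
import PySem

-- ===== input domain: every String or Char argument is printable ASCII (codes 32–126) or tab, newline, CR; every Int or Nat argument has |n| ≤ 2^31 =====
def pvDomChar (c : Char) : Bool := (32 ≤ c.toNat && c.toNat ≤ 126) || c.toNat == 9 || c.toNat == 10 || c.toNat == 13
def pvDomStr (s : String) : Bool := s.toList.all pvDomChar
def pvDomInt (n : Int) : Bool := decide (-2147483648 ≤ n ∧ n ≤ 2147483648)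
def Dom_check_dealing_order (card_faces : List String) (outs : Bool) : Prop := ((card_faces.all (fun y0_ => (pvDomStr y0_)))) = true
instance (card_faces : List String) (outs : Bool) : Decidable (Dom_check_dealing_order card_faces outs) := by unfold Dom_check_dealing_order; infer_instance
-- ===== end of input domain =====

-- B replaces A's stateful found_empty flag scan with a filter-then-prefix-compare; objective: simpler.

-- ===== PORT A =====
-- the for-loop over faces with the found_empty flag and an early 'return False'
def pvLoopA : List String → Bool → Bool
  | [], _ => true
  | face :: rest, found_empty =>
    if face = "" then pvLoopA rest true
    else if found_empty then false
    else pvLoopA rest found_empty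

def check_dealing_order (card_faces : List String) (outs : Bool) : Bool :=
  let expected_len : Int := if outs then 6 else 4
  if (card_faces.length : Int) < expected_len then false
  else
    let faces := PySem.List.slice card_faces none (some expected_len)
    pvLoopA faces false

-- ===== PORT B =====
def check_dealing_order_alt (card_faces : List String) (outs : Bool) : Bool :=
  let expected_len : Int := if outs then 6 else 4
  if (card_faces.length : Int) < expected_len then false
  else
    let faces := PySem.List.slice card_faces none (some expected_len)
    let non_empty := faces.filter (fun f => f ≠ "")
    PySem.List.slice faces none (some ((non_empty.length : Int))) == non_empty

-- ===== PRECONDITION & SPEC =====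
def Spec_check_dealing_order (card_faces : List String) (outs : Bool) (out : Bool) : Prop := out = check_dealing_order_alt card_faces outs
instance (card_faces : List String) (outs : Bool) (out : Bool) : Decidable (Spec_check_dealing_order card_faces outs out) := by unfold Spec_check_dealing_order; infer_instance

-- ===== CLAIM (what is proved, stated in full; the proofs are below) =====
def Claim_equal_check_dealing_order : Prop := ∀ (card_faces : List String) (outs : Bool), Dom_check_dealing_order card_faces outs → Spec_check_dealing_order card_faces outs (check_dealing_order card_faces outs)

-- ===== LEMMAS AND PROOFS =====

lemma pvLoopA_true (l : List String) : pvLoopA l true = l.all (fun f => f == "") := by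
  induction l with
  | nil => rfl
  | cons f rest ih =>
      by_cases h : f = "" <;> simp [pvLoopA, h, ih]

lemma pvLoopA_false (l : List String) :
    pvLoopA l false =
      (l.take ((l.filter (fun f => f ≠ "")).length) == l.filter (fun f => f ≠ "")) := by
  induction l with
  | nil => rfl
  | cons f rest ih =>
      by_cases h : f = ""
      · subst h
        simp only [pvLoopA, if_pos rfl, pvLoopA_true]
        have hfil : ("" :: rest).filter (fun f => f ≠ "") = rest.filter (fun f => f ≠ "") := by
          simp
        rw [hfil]
        cases hf : rest.filter (fun f => f ≠ "") with
        | nil =>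
            simp [List.filter_eq_nil_iff] at hf
            simp [List.all_eq_true]
            intro x hx
            exact hf x hx
        | cons a as =>
            have ha : a ≠ "" := by
              have := List.mem_filter.mp (hf ▸ List.mem_cons_self (l := as))
              simpa using this.2
            have hmem : a ∈ rest := (List.mem_filter.mp (hf ▸ List.mem_cons_self (l := as))).1
            have hall : (rest.all fun f => f == "") = false := by
              rw [Bool.eq_false_iff]
              simp only [ne_eq, List.all_eq_true, not_forall]
              exact ⟨a, hmem, by simpa using ha⟩
            simp [List.take_succ_cons, hall, Ne.symm ha]
      · simp [pvLoopA, h, ih, List.filter_cons, List.take_succ_cons]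

-- ===== VERDICT (by name: the statement is the Claim_ definition above) =====
theorem check_dealing_order_spec : Claim_equal_check_dealing_order := by
  intro card_faces outs _
  unfold Spec_check_dealing_order check_dealing_order check_dealing_order_alt
  by_cases hlen : (card_faces.length : Int) < (if outs then (6 : Int) else 4)
  · simp only [if_pos hlen]
  · simp only [if_neg hlen]
    rw [pvLoopA_false, PySem.List.slice_to_natCast]
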